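-- pv_equiv track=rewrite | github.com/unfoldingWord-dev/tools | tsv/tsv_cleanup.py | mergeRows
-- ===== SOURCE A (Python) =====
-- def mergeRows(data):
--     nrows = len(data)
--     standard = data[1][0]
--     newdata = []
--     newdata.append(data[0])
--     i = 1
--     while i < nrows - 1:
--         row = data[i]
--         while len(row) == 9 and row[0] == standard and i+1 < nrows and len(data[i+1]) == 1:
--             fragment = data[i+1][0].rstrip()
--             if len(fragment) > 0:
--                 if row[2] == "intro":   # intro rows have multiple "lines" and markdown syntax
--                     row[8] += "<br>"
--                 else:
--                     row[8] += " "
--                 row[8] += fragment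
--             i += 1
--         newdata.append(row)
--         i += 1
--     if i < nrows:
--         newdata.append(data[i])
--     return newdata
-- ===== SOURCE B (Python) =====
-- def mergeRows(data):
--     standard = data[1][0]
--     newdata = [data[0]]
--     for row in data[1:]:
--         prev = newdata[-1] if len(newdata) > 1 else None
--         if len(row) == 1 and prev is not None and len(prev) == 9 and prev[0] == standard:
--             fragment = row[0].rstrip()
--             if fragment:
--                 prev[8] += "<br>" if prev[2] == "intro" else " "
--                 prev[8] += fragment
--         else:
--             newdata.append(row)
--     return newdata
-- ===== Notes on version B (the rewrite author's own statement) =====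
-- stated objective: simpler
-- what changed: Replaced A's nested index-driven while loops (inner fragment-absorbing loop plus a trailing-row fixup append) by a single flat pass over the rows that merges each one-column fragment row into the last emitted row when it qualifies.
import Mathlib
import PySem

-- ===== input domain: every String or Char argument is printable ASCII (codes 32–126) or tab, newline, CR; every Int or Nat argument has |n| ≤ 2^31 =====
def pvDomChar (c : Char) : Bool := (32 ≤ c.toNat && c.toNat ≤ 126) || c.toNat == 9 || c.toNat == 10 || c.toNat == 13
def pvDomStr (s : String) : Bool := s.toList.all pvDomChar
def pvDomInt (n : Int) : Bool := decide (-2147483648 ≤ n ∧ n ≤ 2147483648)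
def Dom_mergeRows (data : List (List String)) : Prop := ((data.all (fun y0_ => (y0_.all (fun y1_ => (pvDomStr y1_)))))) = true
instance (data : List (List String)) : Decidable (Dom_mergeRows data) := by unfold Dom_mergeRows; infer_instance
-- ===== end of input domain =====

-- B replaces A's nested index-based while loops (with a trailing-row fixup) by a single
-- look-back pass over the rows that merges each fragment into the last emitted row (objective:
-- simpler). Both Pythons mutate the merged base rows of `data` in place; the theorems are about
-- the return value.

-- ===== PORT A =====
-- shared by both ports: the textually identical fragment-merging statements of both Pythons
def pvMergeFrag (row f : List String) : List String :=
  let fragment := PySem.Str.rstrip (f.getD 0 "")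
  if PySem.Str.len fragment > 0 then
    let row1 := if row.getD 2 "" = "intro" then row.set 8 (row.getD 8 "" ++ "<br>")
                else row.set 8 (row.getD 8 "" ++ " ")
    row1.set 8 (row1.getD 8 "" ++ fragment)
  else row

-- A's inner `while`: absorb following one-column rows into `row`, advancing i.
-- The loop is ported with a structural fuel argument; every call supplies fuel = nrows,
-- an upper bound on the iteration count, so the 0-fuel case is never reached.
def pvInnerA (data : List (List String)) (std : String) (nrows : Nat) :
    Nat → List String → Nat → List String × Nat
  | 0, row, i => (row, i)
  | fuel+1, row, i =>
    if row.length = 9 ∧ row.getD 0 "" = std ∧ i + 1 < nrows ∧ (data.getD (i+1) []).length = 1 then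
      pvInnerA data std nrows fuel (pvMergeFrag row (data.getD (i+1) [])) (i+1)
    else (row, i)

-- A's outer `while` plus the final `if i < nrows` append (fuel = nrows again; the 0-fuel
-- branch is the loop-exit code and is only reached once i ≥ nrows)
def pvOuterA (data : List (List String)) (std : String) (nrows : Nat) :
    Nat → Nat → List (List String) → List (List String)
  | 0, i, newdata => if i < nrows then newdata ++ [data.getD i []] else newdata
  | fuel+1, i, newdata =>
    if i < nrows - 1 then
      let p := pvInnerA data std nrows nrows (data.getD i []) i
      pvOuterA data std nrows fuel (p.2 + 1) (newdata ++ [p.1])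
    else if i < nrows then newdata ++ [data.getD i []] else newdata

def mergeRows (data : List (List String)) : List (List String) :=
  let nrows := data.length
  let standard := (data.getD 1 []).getD 0 ""
  pvOuterA data standard nrows nrows 1 [data.getD 0 []]

-- ===== PORT B =====
def pvStepB (std : String) (nd : List (List String)) (row : List String) : List (List String) :=
  if 1 < nd.length then
    let prev := nd.getLastD []
    if row.length = 1 ∧ prev.length = 9 ∧ prev.getD 0 "" = std then
      nd.dropLast ++ [pvMergeFrag prev row]
    else nd ++ [row]
  else nd ++ [row]

def mergeRows_alt (data : List (List String)) : List (List String) :=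
  let standard := (data.getD 1 []).getD 0 ""
  (data.drop 1).foldl (pvStepB standard) [data.getD 0 []]

-- ===== PRECONDITION & SPEC =====
-- Pre_ excludes exactly the inputs where `data[1][0]` raises IndexError in both A and B:
-- fewer than two rows, or an empty second row.
def Pre_mergeRows (data : List (List String)) : Prop :=
  2 ≤ data.length ∧ data.getD 1 [] ≠ []
instance (data : List (List String)) : Decidable (Pre_mergeRows data) := by
  unfold Pre_mergeRows; infer_instance
def pvWitness_mergeRows : List (List String) := [["a"], ["b"]]
def Spec_mergeRows (data : List (List String)) (out : List (List String)) : Prop := out = mergeRows_alt data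
instance (data : List (List String)) (out : List (List String)) : Decidable (Spec_mergeRows data out) := by unfold Spec_mergeRows; infer_instance

-- ===== CLAIM (what is proved, stated in full; the proofs are below) =====
def Claim_equal_mergeRows : Prop := ∀ (data : List (List String)), Dom_mergeRows data → Pre_mergeRows data → Spec_mergeRows data (mergeRows data)

-- ===== LEMMAS AND PROOFS =====

-- common characterisation: absorb leading one-column fragment rows into `row`
def pvAbsorb (std : String) (row : List String) : List (List String) → List String × List (List String)
  | [] => (row, [])
  | f :: rest => if f.length = 1 then pvAbsorb std (pvMergeFrag row f) rest else (row, f :: rest)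

theorem pvAbsorb_len (std : String) (row : List String) (l : List (List String)) :
    (pvAbsorb std row l).2.length ≤ l.length := by
  fun_induction pvAbsorb std row l with
  | case1 => simp
  | case2 _ _ _ _ ih => simpa using Nat.le_succ_of_le ih
  | case3 => simp

def pvSpecGo (std : String) : Nat → List (List String) → List (List String)
  | _, [] => []
  | 0, l => l
  | fuel+1, r :: rest =>
    if r.length = 9 ∧ r.getD 0 "" = std then
      let p := pvAbsorb std r rest
      p.1 :: pvSpecGo std fuel p.2
    else r :: pvSpecGo std fuel rest

def pvSpecMerge (std : String) (l : List (List String)) : List (List String) :=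
  pvSpecGo std l.length l

theorem pvSpecGo_fuel (std : String) : ∀ (fuel fuel' : Nat) (l : List (List String)),
    l.length ≤ fuel → l.length ≤ fuel' → pvSpecGo std fuel l = pvSpecGo std fuel' l := by
  intro fuel
  induction fuel with
  | zero =>
    intro fuel' l h _
    match l, fuel' with
    | [], 0 => rfl
    | [], _+1 => rfl
    | _ :: _, _ => simp at h
  | succ fuel ih =>
    intro fuel' l h h'
    match l, fuel' with
    | [], 0 => rfl
    | [], _+1 => rfl
    | r :: rest, 0 => simp at h'
    | r :: rest, fuel'+1 =>
      simp only [List.length_cons, Nat.add_le_add_iff_right] at h h'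
      rw [pvSpecGo, pvSpecGo]
      split_ifs
      · exact congrArg _ (ih fuel' _ (le_trans (pvAbsorb_len std _ rest) h)
          (le_trans (pvAbsorb_len std _ rest) h'))
      · exact congrArg _ (ih fuel' rest h h')

def pvContB (std : String) (last : List String) (rest : List (List String)) : List (List String) :=
  if last.length = 9 ∧ last.getD 0 "" = std then
    let p := pvAbsorb std last rest
    p.1 :: pvSpecMerge std p.2
  else last :: pvSpecMerge std rest

theorem pvSpecMerge_cons (std : String) (r : List String) (rest : List (List String)) :
    pvSpecMerge std (r :: rest) = pvContB std r rest := by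
  rw [pvSpecMerge, pvContB, List.length_cons, pvSpecGo]
  split_ifs
  · exact congrArg _ (pvSpecGo_fuel std rest.length _ _
      (pvAbsorb_len std r rest) le_rfl)
  · rfl

theorem pvMergeFrag_len (row f : List String) (h : row.length = 9) :
    (pvMergeFrag row f).length = 9 := by
  unfold pvMergeFrag; dsimp only; split_ifs <;> simp [h]

theorem pvMergeFrag_getD0 (row f : List String) (_h : row.length = 9) :
    (pvMergeFrag row f).getD 0 "" = row.getD 0 "" := by
  unfold pvMergeFrag; dsimp only
  split_ifs <;> simp [List.getD, List.getElem?_set]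

theorem pvInnerA_notqual (data : List (List String)) (std : String) (nrows fuel : Nat)
    (row : List String) (i : Nat) (h : ¬ (row.length = 9 ∧ row.getD 0 "" = std)) :
    pvInnerA data std nrows fuel row i = (row, i) := by
  cases fuel with
  | zero => rfl
  | succ fuel => rw [pvInnerA, if_neg (by tauto)]

theorem pvInnerA_ge (data : List (List String)) (std : String) (nrows : Nat) :
    ∀ (fuel : Nat) (row : List String) (i : Nat),
    i ≤ (pvInnerA data std nrows fuel row i).2 := by
  intro fuel
  induction fuel with
  | zero => intro row i; exact le_rfl
  | succ fuel ih =>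
    intro row i
    rw [pvInnerA]
    split_ifs
    · exact le_trans (Nat.le_succ i) (ih _ (i+1))
    · exact le_rfl

-- A's inner while computed by pvAbsorb on the suffix of fragments
theorem pvInnerA_eq (data : List (List String)) (std : String) :
    ∀ (fuel : Nat) (row : List String) (i : Nat), data.length ≤ fuel + i →
    row.length = 9 ∧ row.getD 0 "" = std →
    (pvInnerA data std data.length fuel row i).1 = (pvAbsorb std row (data.drop (i+1))).1 ∧
    data.drop ((pvInnerA data std data.length fuel row i).2 + 1)
      = (pvAbsorb std row (data.drop (i+1))).2 := by
  intro fuel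
  induction fuel with
  | zero =>
    intro row i hfuel hq
    have hdrop : data.drop (i+1) = [] := List.drop_eq_nil_of_le (by omega)
    rw [pvInnerA, hdrop, pvAbsorb]
    exact ⟨rfl, rfl⟩
  | succ fuel ih =>
    intro row i hfuel hq
    rw [pvInnerA]
    split_ifs with h
    · obtain ⟨h9, h0, hlt, hf⟩ := h
      have hdrop : data.drop (i+1) = data.getD (i+1) [] :: data.drop (i+2) := by
        rw [List.getD_eq_getElem _ _ hlt, List.drop_eq_getElem_cons hlt]
      rw [hdrop, pvAbsorb, if_pos hf]
      exact ih _ (i+1) (by omega)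
        ⟨pvMergeFrag_len _ _ h9, by rw [pvMergeFrag_getD0 _ _ h9]; exact h0⟩
    · by_cases hlt : i + 1 < data.length
      · have hf : ¬ (data.getD (i+1) []).length = 1 := by
          intro hc; exact h ⟨hq.1, hq.2, hlt, hc⟩
        have hdrop : data.drop (i+1) = data.getD (i+1) [] :: data.drop (i+2) := by
          rw [List.getD_eq_getElem _ _ hlt, List.drop_eq_getElem_cons hlt]
        rw [hdrop, pvAbsorb, if_neg hf, ← hdrop]
        exact ⟨rfl, rfl⟩
      · have hdrop : data.drop (i+1) = [] := List.drop_eq_nil_of_le (by omega)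
        rw [hdrop, pvAbsorb]
        exact ⟨rfl, rfl⟩

theorem pvContB_nil (std : String) (last : List String) : pvContB std last [] = [last] := by
  rw [pvContB]; split_ifs <;> rfl

-- A's outer while equals the spec on the remaining suffix
theorem pvOuterA_eq (data : List (List String)) (std : String) :
    ∀ (fuel i : Nat) (nd : List (List String)), data.length ≤ fuel + i →
    pvOuterA data std data.length fuel i nd = nd ++ pvSpecMerge std (data.drop i) := by
  intro fuel
  induction fuel with
  | zero =>
    intro i nd hfuel
    have hdrop : data.drop i = [] := List.drop_eq_nil_of_le (by omega)
    rw [pvOuterA, if_neg (by omega), hdrop]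
    simp [pvSpecMerge, pvSpecGo]
  | succ fuel ih =>
    intro i nd hfuel
    rw [pvOuterA]
    split_ifs with h1 h2
    · have hi : i < data.length := by omega
      have hdrop : data.drop i = data.getD i [] :: data.drop (i+1) := by
        rw [List.getD_eq_getElem _ _ hi, List.drop_eq_getElem_cons hi]
      have hge := pvInnerA_ge data std data.length data.length (data.getD i []) i
      rw [ih _ _ (by omega), hdrop, pvSpecMerge_cons, pvContB]
      by_cases hq : (data.getD i []).length = 9 ∧ (data.getD i []).getD 0 "" = std
      · obtain ⟨e1, e2⟩ := pvInnerA_eq data std data.length (data.getD i []) i (by omega) hq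
        rw [if_pos hq, e1, e2]
        simp
      · rw [if_neg hq, pvInnerA_notqual data std data.length data.length _ i hq]
        simp
    · have hdrop : data.drop i = data.getD i [] :: data.drop (i+1) := by
        rw [List.getD_eq_getElem _ _ h2, List.drop_eq_getElem_cons h2]
      have hnil : data.drop (i+1) = [] := List.drop_eq_nil_of_le (by omega)
      rw [hdrop, hnil, pvSpecMerge_cons, pvContB_nil]
    · have hnil : data.drop i = [] := List.drop_eq_nil_of_le (by omega)
      rw [hnil]
      simp [pvSpecMerge, pvSpecGo]

theorem pvContB_merge (std : String) (last row : List String) (rest : List (List String))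
    (h1 : row.length = 1) (hq : last.length = 9 ∧ last.getD 0 "" = std) :
    pvContB std last (row :: rest) = pvContB std (pvMergeFrag last row) rest := by
  rw [pvContB, pvContB, if_pos hq,
    if_pos ⟨pvMergeFrag_len _ _ hq.1, by rw [pvMergeFrag_getD0 _ _ hq.1]; exact hq.2⟩,
    pvAbsorb, if_pos h1]

theorem pvContB_skip (std : String) (last row : List String) (rest : List (List String))
    (h : ¬ (row.length = 1 ∧ last.length = 9 ∧ last.getD 0 "" = std)) :
    pvContB std last (row :: rest) = last :: pvContB std row rest := by
  by_cases hq : last.length = 9 ∧ last.getD 0 "" = std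
  · have h1 : ¬ row.length = 1 := fun hc => h ⟨hc, hq⟩
    rw [pvContB, if_pos hq, pvAbsorb, if_neg h1]
    dsimp only
    rw [pvSpecMerge_cons]
  · rw [pvContB, if_neg hq, pvSpecMerge_cons]

theorem pvStepB_acc (std : String) (h row last : List String) (pre : List (List String)) :
    pvStepB std (h :: (pre ++ [last])) row =
      if row.length = 1 ∧ last.length = 9 ∧ last.getD 0 "" = std
      then h :: (pre ++ [pvMergeFrag last row])
      else h :: (pre ++ [last]) ++ [row] := by
  rw [pvStepB, if_pos (by simp)]
  have hl : (h :: (pre ++ [last])).getLastD [] = last := by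
    rw [show h :: (pre ++ [last]) = (h :: pre) ++ [last] from by simp]
    simp [List.getLastD]
  have hd : (h :: (pre ++ [last])).dropLast = h :: pre := by
    rw [show h :: (pre ++ [last]) = (h :: pre) ++ [last] from by simp, List.dropLast_concat]
  rw [hl, hd]; split_ifs <;> simp [List.getD] at * <;> tauto

-- B's fold with a non-trivial accumulator
theorem pvFoldB_eq (std : String) (rest : List (List String)) :
    ∀ (h last : List String) (pre : List (List String)),
    rest.foldl (pvStepB std) (h :: (pre ++ [last])) = h :: (pre ++ pvContB std last rest) := by
  induction rest with
  | nil => intro h last pre; rw [pvContB_nil]; simp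
  | cons row rest ih =>
    intro h last pre
    rw [List.foldl_cons, pvStepB_acc]
    split_ifs with hc
    · rw [ih h (pvMergeFrag last row) pre, pvContB_merge _ _ _ _ hc.1 hc.2]
    · rw [show h :: (pre ++ [last]) ++ [row] = h :: ((pre ++ [last]) ++ [row]) from by simp,
        ih h row (pre ++ [last]), pvContB_skip _ _ _ _ hc]
      simp

-- ===== VERDICT (by name: the statement is the Claim_ definition above) =====
theorem mergeRows_spec : Claim_equal_mergeRows := by
  intro data _ hpre
  obtain ⟨hlen, -⟩ := hpre
  unfold Spec_mergeRows mergeRows mergeRows_alt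
  have h1 : 1 < data.length := by omega
  have hdrop : data.drop 1 = data.getD 1 [] :: data.drop 2 := by
    rw [List.getD_eq_getElem _ _ h1, List.drop_eq_getElem_cons h1]
  rw [pvOuterA_eq data ((data.getD 1 []).getD 0 "") data.length 1 _ (by omega), hdrop, List.foldl_cons]
  have hstep : pvStepB ((data.getD 1 []).getD 0 "") [data.getD 0 []] (data.getD 1 [])
      = [data.getD 0 []] ++ [data.getD 1 []] := by
    rw [pvStepB, if_neg (by simp)]
  rw [hstep,
    show ([data.getD 0 []] ++ [data.getD 1 []]) = data.getD 0 [] :: ([] ++ [data.getD 1 []]) from by simp,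
    pvFoldB_eq, pvSpecMerge_cons]
  simp
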